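-- pv_equiv track=rewrite | github.com/meggerrsss/Advent-of-Code | 2025/day4.py | comfy
-- ===== SOURCE A (Python) =====
-- def friendsindex(matrix, i, j, nrows, ncols):
--     if i == 0: # top edge
--         if j == 0: # top left corner
--             friends = [[i+1,j  ], [i  ,j+1], [i+1,j+1]]
--         elif j == ncols-1: # top right corner
--             friends = [[i+1,j  ], [i  ,j-1], [i+1,j-1]]
--         else: # top edge
--             friends = [[i  ,j-1],           [i  ,j+1],
--                        [i+1,j-1], [i+1,j  ],[i+1,j+1]]
--     elif i == nrows-1: # bottom edge
--         if j == 0: # bottom left corner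
--             friends = [[i-1,j  ], [i  ,j+1], [i-1,j+1]]
--         elif j == ncols-1: # bottom right corner
--             friends = [[i-1,j  ], [i  ,j-1], [i-1,j-1]]
--         else: # bottom edge
--             friends = [[i-1,j-1], [i-1,j  ],[i-1,j+1],
--                        [i  ,j-1],           [i  ,j+1]]
--     else: # middle
--         friends = [[i-1,j-1], [i-1,j  ],[i-1,j+1],
--                    [i  ,j-1],           [i  ,j+1],
--                    [i+1,j-1], [i+1,j  ],[i+1,j+1]]
--         for x,y in friends:
--             if x<0 or x>nrows-1:
--                 friends.remove([x,y])
--             if y<0 or y>ncols-1: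
--                 friends.remove([x,y])
--     return friends
--
-- def countfriends(matrix, i, j, nrows, ncols, bad="@"):
--     friends = friendsindex(matrix, i, j, nrows, ncols)
--     count = 0
--     for friendx,friendy in friends:
--         if matrix[friendx][friendy] == bad:
--             count+=1
--     return count
--
-- def comfy(matrix, tolerance, good="@"):
--     nrows,ncols = len(matrix), len(matrix[1])
--     extractable = []
--     for i, row in enumerate(matrix):
--         for j, col in enumerate(row):
--             if countfriends(matrix,i,j,nrows,ncols) < tolerance and matrix[i][j]==good:
--                 extractable.append([i,j])
--     return extractable
-- ===== SOURCE B (Python) =====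
-- def comfy(matrix, tolerance, good="@"):
--     nrows, ncols = len(matrix), len(matrix[1])
--     bad = "@"
--     # 2D prefix-sum table of bad-cell flags: P[r][c] = number of bad cells in matrix[:r][:c]
--     prev = [0] * (ncols + 1)
--     P = [prev]
--     for row in matrix:
--         cur = [0]
--         s = 0
--         for j, cell in enumerate(row):
--             s += 1 if cell == bad else 0
--             cur.append(prev[j + 1] + s)
--         P.append(cur)
--         prev = cur
--     out = []
--     for i in range(nrows):
--         for j in range(ncols):
--             r0, r1 = max(i - 1, 0), min(i + 2, nrows)
--             c0, c1 = max(j - 1, 0), min(j + 2, ncols)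
--             cnt = P[r1][c1] - P[r0][c1] - P[r1][c0] + P[r0][c0]
--             if matrix[i][j] == bad:
--                 cnt -= 1
--             if cnt < tolerance and matrix[i][j] == good:
--                 out.append([i, j])
--     return out
-- ===== Notes on version B (the rewrite author's own statement) =====
-- stated objective: alternative
-- what changed: Replaces per-cell neighbor-list construction (with region-specific branches and a removal loop) by one 2D prefix-sum (summed-area) table of bad-cell flags built in a single pass; each cell's bad-neighbor count is then four table lookups on the clipped 3x3 window minus the center flag.
import Mathlib
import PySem

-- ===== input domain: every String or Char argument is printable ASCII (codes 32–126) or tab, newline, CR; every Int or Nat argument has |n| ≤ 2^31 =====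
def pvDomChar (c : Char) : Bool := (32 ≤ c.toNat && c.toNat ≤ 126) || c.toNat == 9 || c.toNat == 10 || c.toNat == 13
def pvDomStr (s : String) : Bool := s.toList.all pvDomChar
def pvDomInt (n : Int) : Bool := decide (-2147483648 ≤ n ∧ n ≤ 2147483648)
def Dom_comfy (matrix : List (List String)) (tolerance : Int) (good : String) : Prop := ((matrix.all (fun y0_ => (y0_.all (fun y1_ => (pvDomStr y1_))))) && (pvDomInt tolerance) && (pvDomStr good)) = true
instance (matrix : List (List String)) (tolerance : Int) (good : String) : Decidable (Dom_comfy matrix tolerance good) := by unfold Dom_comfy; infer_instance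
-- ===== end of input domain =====

-- B replaces A's per-cell neighbor lists (branching on corners/edges plus a removal loop)
-- by one 2D prefix-sum table of bad-cell flags; each count is 4 lookups minus the center flag.

-- ===== PORT A =====

-- 'if cond: friends.remove([x,y])' step; .getD covers the (unreachable inside Pre_) absent-element ValueError
def pvCondRemove (c : Prop) [Decidable c] (l : List (List Int)) (v : List Int) : List (List Int) :=
  if c then (PySem.List.remove? l v).getD l else l

-- length never grows under a remove step (used only for termination of pvPurge)
theorem pvCondRemove_length_le (c : Prop) [Decidable c] (l : List (List Int)) (v : List Int) :
    (pvCondRemove c l v).length ≤ l.length := by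
  unfold pvCondRemove
  split
  · by_cases h : v ∈ l
    · rw [PySem.List.remove?_eq_some_erase l v h]
      simpa using List.length_erase_le
    · rw [(PySem.List.remove?_eq_none_iff l v).mpr h]
      simp
  · exact le_rfl

-- the in-place 'for x,y in friends: … friends.remove([x,y])' loop of A's middle branch:
-- Python's for advances an internal index over the mutating list; x, y unpack the pair friends[idx]
def pvPurge (nrows ncols : Int) (fr : List (List Int)) (idx : Nat) : List (List Int) :=
  if _h : idx < fr.length then
    let p := fr.getD idx []
    let x := p.getD 0 0
    let y := p.getD 1 0
    let fr1 := pvCondRemove (x < 0 ∨ x > nrows - 1) fr [x, y]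
    let fr2 := pvCondRemove (y < 0 ∨ y > ncols - 1) fr1 [x, y]
    pvPurge nrows ncols fr2 (idx + 1)
  else fr
termination_by fr.length - idx
decreasing_by
  have h1 := pvCondRemove_length_le ((fr.getD idx []).getD 0 0 < 0 ∨ (fr.getD idx []).getD 0 0 > nrows - 1) fr [(fr.getD idx []).getD 0 0, (fr.getD idx []).getD 1 0]
  have h2 := pvCondRemove_length_le ((fr.getD idx []).getD 1 0 < 0 ∨ (fr.getD idx []).getD 1 0 > ncols - 1) (pvCondRemove ((fr.getD idx []).getD 0 0 < 0 ∨ (fr.getD idx []).getD 0 0 > nrows - 1) fr [(fr.getD idx []).getD 0 0, (fr.getD idx []).getD 1 0]) [(fr.getD idx []).getD 0 0, (fr.getD idx []).getD 1 0]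
  omega

def friendsindex (matrix : List (List String)) (i j nrows ncols : Int) : List (List Int) :=
  if i == 0 then
    if j == 0 then [[i+1, j], [i, j+1], [i+1, j+1]]
    else if j == ncols - 1 then [[i+1, j], [i, j-1], [i+1, j-1]]
    else [[i, j-1], [i, j+1], [i+1, j-1], [i+1, j], [i+1, j+1]]
  else if i == nrows - 1 then
    if j == 0 then [[i-1, j], [i, j+1], [i-1, j+1]]
    else if j == ncols - 1 then [[i-1, j], [i, j-1], [i-1, j-1]]
    else [[i-1, j-1], [i-1, j], [i-1, j+1], [i, j-1], [i, j+1]]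
  else
    pvPurge nrows ncols
      [[i-1, j-1], [i-1, j], [i-1, j+1], [i, j-1], [i, j+1], [i+1, j-1], [i+1, j], [i+1, j+1]] 0

-- matrix[fx][fy] == bad; pyGet? = none models the IndexError cases, which Pre_comfy excludes
def countfriends (matrix : List (List String)) (i j nrows ncols : Int) (bad : String) : Int :=
  (friendsindex matrix i j nrows ncols).foldl
    (fun count p =>
      match p with
      | fx :: fy :: _ =>
        if (PySem.List.pyGet? matrix fx).bind (fun r => PySem.List.pyGet? r fy) = some bad
        then count + 1 else count
      | _ => count)
    0

def comfy (matrix : List (List String)) (tolerance : Int) (good : String) : List (List Int) :=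
  let nrows : Int := matrix.length
  let ncols : Int := ((PySem.List.pyGet? matrix 1).getD []).length  -- len(matrix[1]); Pre_comfy gives 2 ≤ len(matrix)
  (PySem.List.enumerate matrix 0).foldl
    (fun extractable p =>
      (PySem.List.enumerate p.2 0).foldl
        (fun ext q =>
          if countfriends matrix p.1 q.1 nrows ncols "@" < tolerance ∧
             (PySem.List.pyGet? matrix p.1).bind (fun r => PySem.List.pyGet? r q.1) = some good
          then ext ++ [[p.1, q.1]] else ext)
        extractable)
    []

-- ===== PORT B =====

-- inner loop of Source B's table build: cur = [0]; for j, cell in enumerate(row): s += flag; cur.append(prev[j+1] + s)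
def pvRowScan (bad : String) (prev : List Int) (row : List String) : List Int :=
  ((PySem.List.enumerate row 0).foldl
    (fun (st : List Int × Int) q =>
      let s := st.2 + (if q.2 == bad then 1 else 0)
      (st.1 ++ [(PySem.List.pyGet? prev (q.1 + 1)).getD 0 + s], s))  -- prev[j+1]; in range inside Pre_comfy
    ([0], 0)).1

-- P = [[0]*(ncols+1)]; for row in matrix: P.append(rowscan); prev = cur
def pvPrefix (bad : String) (matrix : List (List String)) (ncols : Nat) : List (List Int) :=
  (matrix.foldl
    (fun (st : List (List Int) × List Int) row =>
      let cur := pvRowScan bad st.2 row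
      (st.1 ++ [cur], cur))
    ([List.replicate (ncols + 1) 0], List.replicate (ncols + 1) 0)).1

def comfy_alt (matrix : List (List String)) (tolerance : Int) (good : String) : List (List Int) :=
  let nrows : Int := matrix.length
  let ncols : Int := ((PySem.List.pyGet? matrix 1).getD []).length
  let P := pvPrefix "@" matrix ncols.toNat
  (PySem.List.pyRange 0 nrows 1).foldl
    (fun out i =>
      (PySem.List.pyRange 0 ncols 1).foldl
        (fun out2 j =>
          let r0 := max (i - 1) 0
          let r1 := min (i + 2) nrows
          let c0 := max (j - 1) 0
          let c1 := min (j + 2) ncols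
          let q := fun (r c : Int) => (PySem.List.pyGet? ((PySem.List.pyGet? P r).getD []) c).getD 0  -- P[r][c]; in range inside Pre_comfy
          let cnt0 := q r1 c1 - q r0 c1 - q r1 c0 + q r0 c0
          let cnt := if (PySem.List.pyGet? matrix i).bind (fun r => PySem.List.pyGet? r j) = some "@"
                     then cnt0 - 1 else cnt0
          if cnt < tolerance ∧
             (PySem.List.pyGet? matrix i).bind (fun r => PySem.List.pyGet? r j) = some good
          then out2 ++ [[i, j]] else out2)
        out)
    []

-- ===== PRECONDITION & SPEC =====
-- Pre_comfy holds exactly where A returns: fewer than 2 rows raises IndexError in len(matrix[1]);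
-- on ragged matrices and on single-column matrices some neighbour lookup matrix[x][y] raises IndexError.
def Pre_comfy (matrix : List (List String)) (tolerance : Int) (good : String) : Prop :=
  2 ≤ matrix.length ∧ (∀ r ∈ matrix, r.length = (matrix.getD 1 []).length) ∧
    (matrix.getD 1 []).length ≠ 1
instance (matrix : List (List String)) (tolerance : Int) (good : String) : Decidable (Pre_comfy matrix tolerance good) := by unfold Pre_comfy; infer_instance

def pvWitness_comfy : List (List String) × Int × String := ([["@", "."], [".", "@"]], 2, "@")

def Spec_comfy (matrix : List (List String)) (tolerance : Int) (good : String) (out : List (List Int)) : Prop := out = comfy_alt matrix tolerance good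
instance (matrix : List (List String)) (tolerance : Int) (good : String) (out : List (List Int)) : Decidable (Spec_comfy matrix tolerance good out) := by unfold Spec_comfy; infer_instance

-- ===== CLAIM (what is proved, stated in full; the proofs are below) =====
def Claim_equal_comfy : Prop := ∀ (matrix : List (List String)) (tolerance : Int) (good : String), Dom_comfy matrix tolerance good → Pre_comfy matrix tolerance good → Spec_comfy matrix tolerance good (comfy matrix tolerance good)

-- ===== LEMMAS AND PROOFS =====


-- ---------- reference quantities (proof-only) ----------

-- 0/1 flag of cell (x, y) being bad (in-range use only)
def pvFlag (matrix : List (List String)) (x y : Nat) : Int :=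
  if (matrix.getD x []).getD y "" == "@" then 1 else 0

-- number of bad cells among the first c cells of row x
def pvRC (matrix : List (List String)) (x c : Nat) : Int :=
  (((matrix.getD x []).take c).countP (fun s => s == "@") : Int)

-- number of bad cells in the first r rows restricted to the first c columns
def pvPV (matrix : List (List String)) : Nat → Nat → Int
  | 0, _ => 0
  | r + 1, c => pvPV matrix r c + pvRC matrix r c

-- contribution of one friends-entry to countfriends
def pvAtom (matrix : List (List String)) (bad : String) (p : List Int) : Int :=
  match p with
  | fx :: fy :: _ =>
    if (PySem.List.pyGet? matrix fx).bind (fun r => PySem.List.pyGet? r fy) = some bad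
    then 1 else 0
  | _ => 0

-- the chain of prefix rows produced by pvPrefix's fold
def pvChain (bad : String) : List (List String) → List Int → List (List Int)
  | [], _ => []
  | row :: rs, prev => pvRowScan bad prev row :: pvChain bad rs (pvRowScan bad prev row)

-- r-th prefix row in absolute terms
def pvPRow (matrix : List (List String)) (ncols : Nat) : Nat → List Int
  | 0 => List.replicate (ncols + 1) 0
  | r + 1 => pvRowScan "@" (pvPRow matrix ncols r) (matrix.getD r [])

-- ---------- small arithmetic facts ----------

theorem pvRC_zero (matrix : List (List String)) (x : Nat) : pvRC matrix x 0 = 0 := by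
  simp [pvRC]

theorem pvPV_zero_right (matrix : List (List String)) (r : Nat) : pvPV matrix r 0 = 0 := by
  induction r with
  | zero => rfl
  | succ r ih => simp [pvPV, ih, pvRC_zero]

theorem pvRC_succ (matrix : List (List String)) (x c : Nat)
    (hc : c < (matrix.getD x []).length) :
    pvRC matrix x (c + 1) = pvRC matrix x c + pvFlag matrix x c := by
  simp only [pvRC, pvFlag, List.take_succ, List.countP_append,
    List.getElem?_eq_getElem hc, List.getD_eq_getElem _ _ hc]
  by_cases h : (matrix.getD x [])[c] == "@" <;> simp [h]

-- ---------- A side: countfriends as a sum of atoms ----------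

theorem countfriends_eq_sum (matrix : List (List String)) (i j nrows ncols : Int) (bad : String) :
    countfriends matrix i j nrows ncols bad
      = ((friendsindex matrix i j nrows ncols).map (pvAtom matrix bad)).sum := by
  unfold countfriends
  trans ((friendsindex matrix i j nrows ncols).foldl (fun count p => count + pvAtom matrix bad p) 0)
  · refine PySem.List.foldl_congr_mem _ _ _ _ ?_
    intro acc p _
    rcases p with _ | ⟨fx, rest⟩
    · simp [pvAtom]
    rcases rest with _ | ⟨fy, rest⟩
    · simp [pvAtom]
    · simp only [pvAtom]; split <;> ring
  · rw [PySem.List.foldl_add]; simp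

theorem pvAtom_eq_flag (matrix : List (List String)) (x y : Nat) (rest : List Int)
    (hx : x < matrix.length) (hy : y < (matrix.getD x []).length) :
    pvAtom matrix "@" ((x : Int) :: (y : Int) :: rest) = pvFlag matrix x y := by
  have hrow : matrix.getD x [] = matrix[x] := List.getD_eq_getElem _ _ hx
  rw [hrow] at hy
  simp [pvAtom, pvFlag, List.getElem?_eq_getElem hx, List.getElem?_eq_getElem hy, hrow,
    List.getD_eq_getElem _ _ hy]

-- ---------- A side: the three purge evaluations ----------

theorem pvCondRemove_neg (c : Prop) [Decidable c] (l : List (List Int)) (v : List Int) (h : ¬c) : pvCondRemove c l v = l := if_neg h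
theorem pvCondRemove_pos (c : Prop) [Decidable c] (l : List (List Int)) (v : List Int) (h : c) : pvCondRemove c l v = (PySem.List.remove? l v).getD l := if_pos h

theorem pvPurge_mid (n m i j : Int) (hi1 : 1 ≤ i) (hi2 : i ≤ n - 2) (hj1 : 1 ≤ j) (hj2 : j ≤ m - 2) :
    pvPurge n m [[i-1, j-1], [i-1, j], [i-1, j+1], [i, j-1], [i, j+1], [i+1, j-1], [i+1, j], [i+1, j+1]] 0
      = [[i-1, j-1], [i-1, j], [i-1, j+1], [i, j-1], [i, j+1], [i+1, j-1], [i+1, j], [i+1, j+1]] := by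
  rw [pvPurge.eq_def, dif_pos (by norm_num)]
  simp only [List.getD_cons_zero, List.getD_cons_succ]
  rw [pvCondRemove_neg _ _ _ (by omega), pvCondRemove_neg _ _ _ (by omega)]
  rw [pvPurge.eq_def, dif_pos (by norm_num)]
  simp only [List.getD_cons_zero, List.getD_cons_succ]
  rw [pvCondRemove_neg _ _ _ (by omega), pvCondRemove_neg _ _ _ (by omega)]
  rw [pvPurge.eq_def, dif_pos (by norm_num)]
  simp only [List.getD_cons_zero, List.getD_cons_succ]
  rw [pvCondRemove_neg _ _ _ (by omega), pvCondRemove_neg _ _ _ (by omega)]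
  rw [pvPurge.eq_def, dif_pos (by norm_num)]
  simp only [List.getD_cons_zero, List.getD_cons_succ]
  rw [pvCondRemove_neg _ _ _ (by omega), pvCondRemove_neg _ _ _ (by omega)]
  rw [pvPurge.eq_def, dif_pos (by norm_num)]
  simp only [List.getD_cons_zero, List.getD_cons_succ]
  rw [pvCondRemove_neg _ _ _ (by omega), pvCondRemove_neg _ _ _ (by omega)]
  rw [pvPurge.eq_def, dif_pos (by norm_num)]
  simp only [List.getD_cons_zero, List.getD_cons_succ]
  rw [pvCondRemove_neg _ _ _ (by omega), pvCondRemove_neg _ _ _ (by omega)]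
  rw [pvPurge.eq_def, dif_pos (by norm_num)]
  simp only [List.getD_cons_zero, List.getD_cons_succ]
  rw [pvCondRemove_neg _ _ _ (by omega), pvCondRemove_neg _ _ _ (by omega)]
  rw [pvPurge.eq_def, dif_pos (by norm_num)]
  simp only [List.getD_cons_zero, List.getD_cons_succ]
  rw [pvCondRemove_neg _ _ _ (by omega), pvCondRemove_neg _ _ _ (by omega)]
  rw [pvPurge.eq_def, dif_neg (by norm_num)]

theorem pvPurge_left (n m i j : Int) (hi1 : 1 ≤ i) (hi2 : i ≤ n - 2) (hj : j = 0) (hm : 2 ≤ m) :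
    pvPurge n m [[i-1, j-1], [i-1, j], [i-1, j+1], [i, j-1], [i, j+1], [i+1, j-1], [i+1, j], [i+1, j+1]] 0
      = [[i-1, j], [i-1, j+1], [i, j+1], [i+1, j], [i+1, j+1]] := by
  rw [pvPurge.eq_def, dif_pos (by norm_num)]
  simp only [List.getD_cons_zero, List.getD_cons_succ]
  rw [pvCondRemove_pos _ _ _ (by omega), pvCondRemove_neg _ _ _ (by omega)]
  rw [PySem.List.remove?_cons_self]
  simp only [Option.getD_some]
  rw [pvPurge.eq_def, dif_pos (by norm_num)]
  simp only [List.getD_cons_zero, List.getD_cons_succ]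
  rw [pvCondRemove_neg _ _ _ (by omega), pvCondRemove_neg _ _ _ (by omega)]
  rw [pvPurge.eq_def, dif_pos (by norm_num)]
  simp only [List.getD_cons_zero, List.getD_cons_succ]
  rw [pvCondRemove_pos _ _ _ (by omega), pvCondRemove_neg _ _ _ (by omega)]
  rw [PySem.List.remove?_cons_of_ne _ (show ([i-1, j] : List Int) ≠ [i, j-1] from by intro hEq; simp at hEq <;> omega)]
  rw [PySem.List.remove?_cons_of_ne _ (show ([i-1, j+1] : List Int) ≠ [i, j-1] from by intro hEq; simp at hEq <;> omega)]
  rw [PySem.List.remove?_cons_self]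
  simp only [Option.map_some, Option.getD_some]
  rw [pvPurge.eq_def, dif_pos (by norm_num)]
  simp only [List.getD_cons_zero, List.getD_cons_succ]
  rw [pvCondRemove_pos _ _ _ (by omega), pvCondRemove_neg _ _ _ (by omega)]
  rw [PySem.List.remove?_cons_of_ne _ (show ([i-1, j] : List Int) ≠ [i+1, j-1] from by intro hEq; simp at hEq <;> omega)]
  rw [PySem.List.remove?_cons_of_ne _ (show ([i-1, j+1] : List Int) ≠ [i+1, j-1] from by intro hEq; simp at hEq <;> omega)]
  rw [PySem.List.remove?_cons_of_ne _ (show ([i, j+1] : List Int) ≠ [i+1, j-1] from by intro hEq; simp at hEq <;> omega)]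
  rw [PySem.List.remove?_cons_self]
  simp only [Option.map_some, Option.getD_some]
  rw [pvPurge.eq_def, dif_pos (by norm_num)]
  simp only [List.getD_cons_zero, List.getD_cons_succ]
  rw [pvCondRemove_neg _ _ _ (by omega), pvCondRemove_neg _ _ _ (by omega)]
  rw [pvPurge.eq_def, dif_neg (by norm_num)]

theorem pvPurge_right (n m i j : Int) (hi1 : 1 ≤ i) (hi2 : i ≤ n - 2) (hj : j = m - 1) (hm : 2 ≤ m) :
    pvPurge n m [[i-1, j-1], [i-1, j], [i-1, j+1], [i, j-1], [i, j+1], [i+1, j-1], [i+1, j], [i+1, j+1]] 0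
      = [[i-1, j-1], [i-1, j], [i, j-1], [i+1, j-1], [i+1, j]] := by
  rw [pvPurge.eq_def, dif_pos (by norm_num)]
  simp only [List.getD_cons_zero, List.getD_cons_succ]
  rw [pvCondRemove_neg _ _ _ (by omega), pvCondRemove_neg _ _ _ (by omega)]
  rw [pvPurge.eq_def, dif_pos (by norm_num)]
  simp only [List.getD_cons_zero, List.getD_cons_succ]
  rw [pvCondRemove_neg _ _ _ (by omega), pvCondRemove_neg _ _ _ (by omega)]
  rw [pvPurge.eq_def, dif_pos (by norm_num)]
  simp only [List.getD_cons_zero, List.getD_cons_succ]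
  rw [pvCondRemove_pos _ _ _ (by omega), pvCondRemove_neg _ _ _ (by omega)]
  rw [PySem.List.remove?_cons_of_ne _ (show ([i-1, j-1] : List Int) ≠ [i-1, j+1] from by intro hEq; simp at hEq <;> omega)]
  rw [PySem.List.remove?_cons_of_ne _ (show ([i-1, j] : List Int) ≠ [i-1, j+1] from by intro hEq; simp at hEq <;> omega)]
  rw [PySem.List.remove?_cons_self]
  simp only [Option.map_some, Option.getD_some]
  rw [pvPurge.eq_def, dif_pos (by norm_num)]
  simp only [List.getD_cons_zero, List.getD_cons_succ]
  rw [pvCondRemove_pos _ _ _ (by omega), pvCondRemove_neg _ _ _ (by omega)]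
  rw [PySem.List.remove?_cons_of_ne _ (show ([i-1, j-1] : List Int) ≠ [i, j+1] from by intro hEq; simp at hEq <;> omega)]
  rw [PySem.List.remove?_cons_of_ne _ (show ([i-1, j] : List Int) ≠ [i, j+1] from by intro hEq; simp at hEq <;> omega)]
  rw [PySem.List.remove?_cons_of_ne _ (show ([i, j-1] : List Int) ≠ [i, j+1] from by intro hEq; simp at hEq <;> omega)]
  rw [PySem.List.remove?_cons_self]
  simp only [Option.map_some, Option.getD_some]
  rw [pvPurge.eq_def, dif_pos (by norm_num)]
  simp only [List.getD_cons_zero, List.getD_cons_succ]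
  rw [pvCondRemove_neg _ _ _ (by omega), pvCondRemove_neg _ _ _ (by omega)]
  rw [pvPurge.eq_def, dif_pos (by norm_num)]
  simp only [List.getD_cons_zero, List.getD_cons_succ]
  rw [pvCondRemove_pos _ _ _ (by omega), pvCondRemove_neg _ _ _ (by omega)]
  rw [PySem.List.remove?_cons_of_ne _ (show ([i-1, j-1] : List Int) ≠ [i+1, j+1] from by intro hEq; simp at hEq <;> omega)]
  rw [PySem.List.remove?_cons_of_ne _ (show ([i-1, j] : List Int) ≠ [i+1, j+1] from by intro hEq; simp at hEq <;> omega)]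
  rw [PySem.List.remove?_cons_of_ne _ (show ([i, j-1] : List Int) ≠ [i+1, j+1] from by intro hEq; simp at hEq <;> omega)]
  rw [PySem.List.remove?_cons_of_ne _ (show ([i+1, j-1] : List Int) ≠ [i+1, j+1] from by intro hEq; simp at hEq <;> omega)]
  rw [PySem.List.remove?_cons_of_ne _ (show ([i+1, j] : List Int) ≠ [i+1, j+1] from by intro hEq; simp at hEq <;> omega)]
  rw [PySem.List.remove?_cons_self]
  simp only [Option.map_some, Option.getD_some]
  rw [pvPurge.eq_def, dif_neg (by norm_num)]

-- ---------- B side: the prefix table ----------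

theorem pvRowScan_closed (bad : String) (prev : List Int) (row : List String) :
    ∀ (k : Int) (acc : List Int) (s : Int),
    (PySem.List.enumerate row k).foldl
      (fun (st : List Int × Int) q =>
        let s' := st.2 + (if q.2 == bad then 1 else 0)
        (st.1 ++ [(PySem.List.pyGet? prev (q.1 + 1)).getD 0 + s'], s'))
      (acc, s)
    = (acc ++ (List.range row.length).map
        (fun (t : Nat) => (PySem.List.pyGet? prev (k + (t : Int) + 1)).getD 0 + s + ((row.take (t + 1)).countP (fun c => c == bad) : Int)),
       s + (row.countP (fun c => c == bad) : Int)) := by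
  induction row with
  | nil => intro k acc s; simp [PySem.List.enumerate_nil]
  | cons x xs ih =>
    intro k acc s
    rw [PySem.List.enumerate_cons, List.foldl_cons]
    rw [ih]
    simp only [Prod.mk.injEq]
    refine ⟨?_, by rw [List.countP_cons]; by_cases h : x == bad <;> push_cast [h] <;> ring⟩
    rw [List.append_assoc]
    congr 1
    rw [List.length_cons, List.range_succ_eq_map, List.map_cons, List.map_map]
    by_cases h : x == bad
    · simp [h]
      exact ⟨by ring, fun a ha => by
        rw [show k + 1 + (a : Int) + 1 = k + ((a : Int) + 1) + 1 from by ring]; ring⟩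
    · simp [h]
      intro a ha
      rw [show k + 1 + (a : Int) + 1 = k + ((a : Int) + 1) + 1 from by ring]

theorem pvRowScan_eq (bad : String) (prev : List Int) (row : List String) :
    pvRowScan bad prev row
      = 0 :: (List.range row.length).map
          (fun (t : Nat) => (PySem.List.pyGet? prev ((t : Int) + 1)).getD 0 + ((row.take (t + 1)).countP (fun c => c == bad) : Int)) := by
  unfold pvRowScan
  rw [pvRowScan_closed]
  simp

theorem pvRowScan_length (bad : String) (prev : List Int) (row : List String) :
    (pvRowScan bad prev row).length = row.length + 1 := by
  simp [pvRowScan_eq]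

theorem pvRowScan_getD (prev : List Int) (row : List String) (c : Nat) (hc : c ≤ row.length) :
    (pvRowScan "@" prev row).getD c 0
      = if c = 0 then 0
        else (PySem.List.pyGet? prev (c : Int)).getD 0 + ((row.take c).countP (fun s => s == "@") : Int) := by
  rw [pvRowScan_eq]
  cases c with
  | zero => simp
  | succ t =>
    have ht : t < row.length := by omega
    simp only [List.getD_cons_succ, if_neg (Nat.succ_ne_zero t)]
    rw [List.getD_eq_getElem _ _ (by simpa using ht)]
    simp only [List.getElem_map, List.getElem_range]
    rw [show ((t + 1 : Nat) : Int) = (t : Int) + 1 from by push_cast; ring]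

theorem pvPRow_length (matrix : List (List String)) (m : Nat)
    (hrect : ∀ r ∈ matrix, r.length = m) :
    ∀ r : Nat, r ≤ matrix.length → (pvPRow matrix m r).length = m + 1 := by
  intro r
  induction r with
  | zero => intro _; simp [pvPRow]
  | succ r _ =>
    intro hr
    have hlt : r < matrix.length := by omega
    rw [pvPRow, pvRowScan_length]
    rw [List.getD_eq_getElem _ _ hlt]
    rw [hrect _ (List.getElem_mem hlt)]

theorem pvPRow_getD (matrix : List (List String)) (m : Nat)
    (hrect : ∀ r ∈ matrix, r.length = m) :
    ∀ r : Nat, r ≤ matrix.length → ∀ c : Nat, c ≤ m →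
      (pvPRow matrix m r).getD c 0 = pvPV matrix r c := by
  intro r
  induction r with
  | zero =>
    intro _ c _
    simp [pvPRow, pvPV, List.getD]
  | succ r ih =>
    intro hr c hc
    have hlt : r < matrix.length := by omega
    have hrowlen : (matrix.getD r []).length = m := by
      rw [List.getD_eq_getElem _ _ hlt]; exact hrect _ (List.getElem_mem hlt)
    rw [pvPRow, pvRowScan_getD _ _ c (by omega)]
    split
    · rename_i h0; subst h0; rw [pvPV_zero_right]
    · rename_i h0
      rw [PySem.List.pyGet?_natCast, ← List.getD_eq_getElem?_getD, ih (by omega) c hc]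
      rfl

theorem pvPrefix_fold (bad : String) :
    ∀ (rows : List (List String)) (acc : List (List Int)) (prev : List Int),
    (rows.foldl
      (fun (st : List (List Int) × List Int) row =>
        let cur := pvRowScan bad st.2 row
        (st.1 ++ [cur], cur))
      (acc, prev)).1 = acc ++ pvChain bad rows prev := by
  intro rows
  induction rows with
  | nil => intro acc prev; simp [pvChain]
  | cons row rs ih =>
    intro acc prev
    rw [List.foldl_cons]
    simp only []
    rw [ih]
    simp [pvChain]

theorem pvPrefix_eq_chain (bad : String) (matrix : List (List String)) (ncols : Nat) :
    pvPrefix bad matrix ncols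
      = List.replicate (ncols + 1) 0 :: pvChain bad matrix (List.replicate (ncols + 1) 0) := by
  unfold pvPrefix
  rw [pvPrefix_fold]
  rfl

theorem pvChain_length (bad : String) (rows : List (List String)) (prev : List Int) :
    (pvChain bad rows prev).length = rows.length := by
  induction rows generalizing prev with
  | nil => rfl
  | cons row rs ih => simp [pvChain, ih]

theorem pvChain_getD (matrix : List (List String)) (m : Nat) :
    ∀ (r k : Nat), k + r < matrix.length →
      (pvChain "@" (matrix.drop k) (pvPRow matrix m k)).getD r []
        = pvPRow matrix m (k + r + 1) := by
  intro r
  induction r with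
  | zero =>
    intro k hk
    have hlt : k < matrix.length := by omega
    rw [List.drop_eq_getElem_cons hlt]
    simp only [pvChain, List.getD_cons_zero]
    rw [pvPRow, List.getD_eq_getElem _ _ hlt]
  | succ r ih =>
    intro k hk
    have hlt : k < matrix.length := by omega
    rw [List.drop_eq_getElem_cons hlt]
    simp only [pvChain, List.getD_cons_succ]
    have hstep : pvRowScan "@" (pvPRow matrix m k) matrix[k] = pvPRow matrix m (k + 1) := by
      rw [pvPRow, List.getD_eq_getElem _ _ hlt]
    rw [hstep, ih (k + 1) (by omega)]
    congr 1
    omega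

-- P[r][c] = pvPV r c (inside the table's bounds)
theorem pvP_getD (matrix : List (List String)) (m : Nat)
    (hrect : ∀ r ∈ matrix, r.length = m) (r c : Nat)
    (hr : r ≤ matrix.length) (hc : c ≤ m) :
    (PySem.List.pyGet? ((PySem.List.pyGet? (pvPrefix "@" matrix m) (r : Int)).getD []) (c : Int)).getD 0
      = pvPV matrix r c := by
  rw [pvPrefix_eq_chain]
  cases r with
  | zero =>
    simp only [Nat.cast_zero, PySem.List.pyGet?_zero_cons, Option.getD_some]
    rw [PySem.List.pyGet?_natCast, List.getElem?_eq_getElem (by simp; omega)]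
    simp [pvPV]
  | succ t =>
    have hcast : ((t + 1 : Nat) : Int) = (t : Int) + 1 := by push_cast; ring
    rw [hcast, PySem.List.pyGet?_cons_succ]
    simp only [PySem.List.pyGet?_natCast]
    have htlen : t < (pvChain "@" matrix (List.replicate (m + 1) 0)).length := by
      rw [pvChain_length]; omega
    rw [List.getElem?_eq_getElem htlen, Option.getD_some]
    have hchain : (pvChain "@" matrix (List.replicate (m + 1) 0))[t] = pvPRow matrix m (t + 1) := by
      have h := pvChain_getD matrix m t 0 (by omega)
      rw [List.getD_eq_getElem _ _ (by simpa [pvChain_length] using htlen)] at h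
      simp only [List.drop_zero] at h
      rw [show pvPRow matrix m 0 = List.replicate (m + 1) 0 from rfl] at h
      rw [show 0 + t + 1 = t + 1 from by omega] at h
      exact h
    rw [hchain]
    have hclen : c < (pvPRow matrix m (t + 1)).length := by
      rw [pvPRow_length matrix m hrect (t + 1) hr]; omega
    rw [List.getElem?_eq_getElem hclen, Option.getD_some, ← List.getD_eq_getElem _ _ hclen]
    exact pvPRow_getD matrix m hrect (t + 1) hr c hc


theorem pvPV_add2 (matrix : List (List String)) (r c : Nat) :
    pvPV matrix (r + 2) c = pvPV matrix r c + pvRC matrix r c + pvRC matrix (r + 1) c := by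
  have h1 : pvPV matrix (r + 2) c = pvPV matrix (r + 1) c + pvRC matrix (r + 1) c := rfl
  have h2 : pvPV matrix (r + 1) c = pvPV matrix r c + pvRC matrix r c := rfl
  rw [h1, h2]

theorem pvPV_add3 (matrix : List (List String)) (r c : Nat) :
    pvPV matrix (r + 3) c = pvPV matrix r c + pvRC matrix r c + pvRC matrix (r + 1) c + pvRC matrix (r + 2) c := by
  have h1 : pvPV matrix (r + 3) c = pvPV matrix (r + 2) c + pvRC matrix (r + 2) c := rfl
  have h2 : pvPV matrix (r + 2) c = pvPV matrix (r + 1) c + pvRC matrix (r + 1) c := rfl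
  have h3 : pvPV matrix (r + 1) c = pvPV matrix r c + pvRC matrix r c := rfl
  rw [h1, h2, h3]

theorem pvRC_add2 (matrix : List (List String)) (x c : Nat)
    (h : c + 2 ≤ (matrix.getD x []).length) :
    pvRC matrix x (c + 2) = pvRC matrix x c + pvFlag matrix x c + pvFlag matrix x (c + 1) := by
  rw [show c + 2 = (c + 1) + 1 from rfl, pvRC_succ matrix x (c + 1) (by omega),
    pvRC_succ matrix x c (by omega)]

theorem pvRC_add3 (matrix : List (List String)) (x c : Nat)
    (h : c + 3 ≤ (matrix.getD x []).length) :
    pvRC matrix x (c + 3) = pvRC matrix x c + pvFlag matrix x c + pvFlag matrix x (c + 1) + pvFlag matrix x (c + 2) := by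
  rw [show c + 3 = ((c + 1) + 1) + 1 from rfl, pvRC_succ matrix x ((c + 1) + 1) (by omega),
    pvRC_succ matrix x (c + 1) (by omega), pvRC_succ matrix x c (by omega)]

-- ---------- the per-cell count equality ----------

theorem pvPercell (matrix : List (List String)) (m : Nat)
    (hrect : ∀ r ∈ matrix, r.length = m)
    (hn : 2 ≤ matrix.length) (hm : 2 ≤ m) (i j : Int)
    (hi0 : 0 ≤ i) (hi : i < matrix.length) (hj0 : 0 ≤ j) (hj : j < m) :
    countfriends matrix i j (matrix.length : Int) (m : Int) "@"
      = (let r0 := max (i - 1) 0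
         let r1 := min (i + 2) (matrix.length : Int)
         let c0 := max (j - 1) 0
         let c1 := min (j + 2) (m : Int)
         let q := fun (r c : Int) =>
           (PySem.List.pyGet? ((PySem.List.pyGet? (pvPrefix "@" matrix m) r).getD []) c).getD 0
         let cnt0 := q r1 c1 - q r0 c1 - q r1 c0 + q r0 c0
         if (PySem.List.pyGet? matrix i).bind (fun r => PySem.List.pyGet? r j) = some "@"
         then cnt0 - 1 else cnt0) := by
  obtain ⟨iN, rfl⟩ : ∃ k : Nat, i = (k : Int) := ⟨i.toNat, (Int.toNat_of_nonneg hi0).symm⟩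
  obtain ⟨jN, rfl⟩ : ∃ k : Nat, j = (k : Int) := ⟨j.toNat, (Int.toNat_of_nonneg hj0).symm⟩
  have hiN : iN < matrix.length := by exact_mod_cast hi
  have hjN : jN < m := by exact_mod_cast hj
  have hrowlen : ∀ x : Nat, x < matrix.length → (matrix.getD x []).length = m := by
    intro x hx
    rw [List.getD_eq_getElem _ _ hx]
    exact hrect _ (List.getElem_mem hx)
  have hatom' : ∀ (x y : Int) (rest : List Int), 0 ≤ x → x < (matrix.length : Int) → 0 ≤ y → y < (m : Int) →
      pvAtom matrix "@" (x :: y :: rest) = pvFlag matrix x.toNat y.toNat := by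
    intro x y rest hx0 hx1 hy0 hy1
    obtain ⟨xN, rfl⟩ : ∃ k : Nat, x = (k : Int) := ⟨x.toNat, (Int.toNat_of_nonneg hx0).symm⟩
    obtain ⟨yN, rfl⟩ : ∃ k : Nat, y = (k : Int) := ⟨y.toNat, (Int.toNat_of_nonneg hy0).symm⟩
    rw [pvAtom_eq_flag matrix xN yN rest (by exact_mod_cast hx1)
      (by rw [hrowlen xN (by exact_mod_cast hx1)]; exact_mod_cast hy1)]
    simp
  have hQ' : ∀ (r c : Int), 0 ≤ r → r ≤ (matrix.length : Int) → 0 ≤ c → c ≤ (m : Int) →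
      (PySem.List.pyGet? ((PySem.List.pyGet? (pvPrefix "@" matrix m) r).getD []) c).getD 0 = pvPV matrix r.toNat c.toNat := by
    intro r c h1 h2 h3 h4
    obtain ⟨rN, rfl⟩ : ∃ k : Nat, r = (k : Int) := ⟨r.toNat, (Int.toNat_of_nonneg h1).symm⟩
    obtain ⟨cN, rfl⟩ : ∃ k : Nat, c = (k : Int) := ⟨c.toNat, (Int.toNat_of_nonneg h3).symm⟩
    rw [pvP_getD matrix m hrect rN cN (by exact_mod_cast h2) (by exact_mod_cast h4)]
    simp
  show _ = (if (PySem.List.pyGet? matrix (iN:Int)).bind (fun r => PySem.List.pyGet? r (jN:Int)) = some "@"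
    then ((PySem.List.pyGet? ((PySem.List.pyGet? (pvPrefix "@" matrix m) (min ((iN:Int) + 2) (matrix.length:Int))).getD []) (min ((jN:Int) + 2) (m:Int))).getD 0 - (PySem.List.pyGet? ((PySem.List.pyGet? (pvPrefix "@" matrix m) (max ((iN:Int) - 1) 0)).getD []) (min ((jN:Int) + 2) (m:Int))).getD 0 - (PySem.List.pyGet? ((PySem.List.pyGet? (pvPrefix "@" matrix m) (min ((iN:Int) + 2) (matrix.length:Int))).getD []) (max ((jN:Int) - 1) 0)).getD 0 + (PySem.List.pyGet? ((PySem.List.pyGet? (pvPrefix "@" matrix m) (max ((iN:Int) - 1) 0)).getD []) (max ((jN:Int) - 1) 0)).getD 0) - 1 else ((PySem.List.pyGet? ((PySem.List.pyGet? (pvPrefix "@" matrix m) (min ((iN:Int) + 2) (matrix.length:Int))).getD []) (min ((jN:Int) + 2) (m:Int))).getD 0 - (PySem.List.pyGet? ((PySem.List.pyGet? (pvPrefix "@" matrix m) (max ((iN:Int) - 1) 0)).getD []) (min ((jN:Int) + 2) (m:Int))).getD 0 - (PySem.List.pyGet? ((PySem.List.pyGet? (pvPrefix "@" matrix m) (min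 ((iN:Int) + 2) (matrix.length:Int))).getD []) (max ((jN:Int) - 1) 0)).getD 0 + (PySem.List.pyGet? ((PySem.List.pyGet? (pvPrefix "@" matrix m) (max ((iN:Int) - 1) 0)).getD []) (max ((jN:Int) - 1) 0)).getD 0))
  have hcen : ∀ X : Int,
      (if (PySem.List.pyGet? matrix (iN:Int)).bind (fun r => PySem.List.pyGet? r (jN:Int)) = some "@"
       then X - 1 else X) = X - pvAtom matrix "@" ((iN:Int) :: (jN:Int) :: []) := by
    intro X
    simp only [pvAtom]
    split <;> ring
  rw [hcen, hatom' (iN:Int) (jN:Int) [] (by omega) (by omega) (by omega) (by omega),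
    countfriends_eq_sum]
  by_cases htop : iN = 0
  · by_cases hjl : jN = 0
    · -- top-left corner
      have hb0 : (((iN:Int)) == 0) = true := by simp [beq_iff_eq]; omega
      have hc0 : (((jN:Int)) == 0) = true := by simp [beq_iff_eq]; omega
      simp only [friendsindex, hb0, hc0, eq_self_iff_true, if_true, Bool.false_eq_true, if_false]
      simp only [List.map_cons, List.map_nil, List.sum_cons, List.sum_nil]
      rw [hatom' ((iN:Int) + 1) ((jN:Int)) [] (by omega) (by omega) (by omega) (by omega)]
      rw [hatom' ((iN:Int)) ((jN:Int) + 1) [] (by omega) (by omega) (by omega) (by omega)]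
      rw [hatom' ((iN:Int) + 1) ((jN:Int) + 1) [] (by omega) (by omega) (by omega) (by omega)]
      rw [hQ' (min ((iN:Int) + 2) (matrix.length:Int)) (min ((jN:Int) + 2) (m:Int)) (by omega) (by omega) (by omega) (by omega)]
      rw [hQ' (max ((iN:Int) - 1) 0) (min ((jN:Int) + 2) (m:Int)) (by omega) (by omega) (by omega) (by omega)]
      rw [hQ' (min ((iN:Int) + 2) (matrix.length:Int)) (max ((jN:Int) - 1) 0) (by omega) (by omega) (by omega) (by omega)]
      rw [hQ' (max ((iN:Int) - 1) 0) (max ((jN:Int) - 1) 0) (by omega) (by omega) (by omega) (by omega)]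
      rw [show (min ((iN:Int) + 2) (matrix.length:Int)).toNat = 0 + 2 from by omega]
      rw [show (max ((iN:Int) - 1) 0).toNat = 0 from by omega]
      rw [show (min ((jN:Int) + 2) (m:Int)).toNat = 0 + 2 from by omega]
      rw [show (max ((jN:Int) - 1) 0).toNat = 0 from by omega]
      rw [show (((iN:Int)) : Int).toNat = 0 from by omega]
      rw [show (((iN:Int) + 1) : Int).toNat = 0 + 1 from by omega]
      rw [show (((jN:Int)) : Int).toNat = 0 from by omega]
      rw [show (((jN:Int) + 1) : Int).toNat = 0 + 1 from by omega]
      simp only [pvPV_add2]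
      rw [pvRC_add2 matrix (0) (0) (by rw [hrowlen (0) (by omega)]; omega)]
      rw [pvRC_add2 matrix (0 + 1) (0) (by rw [hrowlen (0 + 1) (by omega)]; omega)]
      ring
    · by_cases hjr : jN = m - 1
      · -- top-right corner
        have hb0 : (((iN:Int)) == 0) = true := by simp [beq_iff_eq]; omega
        have hc0 : (((jN:Int)) == 0) = false := by simp [beq_iff_eq]; omega
        have hc1 : (((jN:Int)) == (m:Int) - 1) = true := by simp [beq_iff_eq]; omega
        simp only [friendsindex, hb0, hc0, hc1, eq_self_iff_true, if_true, Bool.false_eq_true, if_false]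
        simp only [List.map_cons, List.map_nil, List.sum_cons, List.sum_nil]
        rw [hatom' ((iN:Int) + 1) ((jN:Int)) [] (by omega) (by omega) (by omega) (by omega)]
        rw [hatom' ((iN:Int)) ((jN:Int) - 1) [] (by omega) (by omega) (by omega) (by omega)]
        rw [hatom' ((iN:Int) + 1) ((jN:Int) - 1) [] (by omega) (by omega) (by omega) (by omega)]
        rw [hQ' (min ((iN:Int) + 2) (matrix.length:Int)) (min ((jN:Int) + 2) (m:Int)) (by omega) (by omega) (by omega) (by omega)]
        rw [hQ' (max ((iN:Int) - 1) 0) (min ((jN:Int) + 2) (m:Int)) (by omega) (by omega) (by omega) (by omega)]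
        rw [hQ' (min ((iN:Int) + 2) (matrix.length:Int)) (max ((jN:Int) - 1) 0) (by omega) (by omega) (by omega) (by omega)]
        rw [hQ' (max ((iN:Int) - 1) 0) (max ((jN:Int) - 1) 0) (by omega) (by omega) (by omega) (by omega)]
        rw [show (min ((iN:Int) + 2) (matrix.length:Int)).toNat = 0 + 2 from by omega]
        rw [show (max ((iN:Int) - 1) 0).toNat = 0 from by omega]
        rw [show (min ((jN:Int) + 2) (m:Int)).toNat = jN - 1 + 2 from by omega]
        rw [show (max ((jN:Int) - 1) 0).toNat = jN - 1 from by omega]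
        rw [show (((iN:Int)) : Int).toNat = 0 from by omega]
        rw [show (((iN:Int) + 1) : Int).toNat = 0 + 1 from by omega]
        rw [show (((jN:Int) - 1) : Int).toNat = jN - 1 from by omega]
        rw [show (((jN:Int)) : Int).toNat = jN - 1 + 1 from by omega]
        simp only [pvPV_add2]
        rw [pvRC_add2 matrix (0) (jN - 1) (by rw [hrowlen (0) (by omega)]; omega)]
        rw [pvRC_add2 matrix (0 + 1) (jN - 1) (by rw [hrowlen (0 + 1) (by omega)]; omega)]
        ring
      · -- top edge
        have hb0 : (((iN:Int)) == 0) = true := by simp [beq_iff_eq]; omega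
        have hc0 : (((jN:Int)) == 0) = false := by simp [beq_iff_eq]; omega
        have hc1 : (((jN:Int)) == (m:Int) - 1) = false := by simp [beq_iff_eq]; omega
        simp only [friendsindex, hb0, hc0, hc1, eq_self_iff_true, if_true, Bool.false_eq_true, if_false]
        simp only [List.map_cons, List.map_nil, List.sum_cons, List.sum_nil]
        rw [hatom' ((iN:Int)) ((jN:Int) - 1) [] (by omega) (by omega) (by omega) (by omega)]
        rw [hatom' ((iN:Int)) ((jN:Int) + 1) [] (by omega) (by omega) (by omega) (by omega)]
        rw [hatom' ((iN:Int) + 1) ((jN:Int) - 1) [] (by omega) (by omega) (by omega) (by omega)]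
        rw [hatom' ((iN:Int) + 1) ((jN:Int)) [] (by omega) (by omega) (by omega) (by omega)]
        rw [hatom' ((iN:Int) + 1) ((jN:Int) + 1) [] (by omega) (by omega) (by omega) (by omega)]
        rw [hQ' (min ((iN:Int) + 2) (matrix.length:Int)) (min ((jN:Int) + 2) (m:Int)) (by omega) (by omega) (by omega) (by omega)]
        rw [hQ' (max ((iN:Int) - 1) 0) (min ((jN:Int) + 2) (m:Int)) (by omega) (by omega) (by omega) (by omega)]
        rw [hQ' (min ((iN:Int) + 2) (matrix.length:Int)) (max ((jN:Int) - 1) 0) (by omega) (by omega) (by omega) (by omega)]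
        rw [hQ' (max ((iN:Int) - 1) 0) (max ((jN:Int) - 1) 0) (by omega) (by omega) (by omega) (by omega)]
        rw [show (min ((iN:Int) + 2) (matrix.length:Int)).toNat = 0 + 2 from by omega]
        rw [show (max ((iN:Int) - 1) 0).toNat = 0 from by omega]
        rw [show (min ((jN:Int) + 2) (m:Int)).toNat = jN - 1 + 3 from by omega]
        rw [show (max ((jN:Int) - 1) 0).toNat = jN - 1 from by omega]
        rw [show (((iN:Int)) : Int).toNat = 0 from by omega]
        rw [show (((iN:Int) + 1) : Int).toNat = 0 + 1 from by omega]
        rw [show (((jN:Int) - 1) : Int).toNat = jN - 1 from by omega]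
        rw [show (((jN:Int)) : Int).toNat = jN - 1 + 1 from by omega]
        rw [show (((jN:Int) + 1) : Int).toNat = jN - 1 + 2 from by omega]
        simp only [pvPV_add2]
        rw [pvRC_add3 matrix (0) (jN - 1) (by rw [hrowlen (0) (by omega)]; omega)]
        rw [pvRC_add3 matrix (0 + 1) (jN - 1) (by rw [hrowlen (0 + 1) (by omega)]; omega)]
        ring
  · by_cases hbot : iN = matrix.length - 1
    · by_cases hjl : jN = 0
      · -- bottom-left corner
        have hb0 : (((iN:Int)) == 0) = false := by simp [beq_iff_eq]; omega
        have hb1 : (((iN:Int)) == (matrix.length:Int) - 1) = true := by simp [beq_iff_eq]; omega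
        have hc0 : (((jN:Int)) == 0) = true := by simp [beq_iff_eq]; omega
        simp only [friendsindex, hb0, hb1, hc0, eq_self_iff_true, if_true, Bool.false_eq_true, if_false]
        simp only [List.map_cons, List.map_nil, List.sum_cons, List.sum_nil]
        rw [hatom' ((iN:Int) - 1) ((jN:Int)) [] (by omega) (by omega) (by omega) (by omega)]
        rw [hatom' ((iN:Int)) ((jN:Int) + 1) [] (by omega) (by omega) (by omega) (by omega)]
        rw [hatom' ((iN:Int) - 1) ((jN:Int) + 1) [] (by omega) (by omega) (by omega) (by omega)]
        rw [hQ' (min ((iN:Int) + 2) (matrix.length:Int)) (min ((jN:Int) + 2) (m:Int)) (by omega) (by omega) (by omega) (by omega)]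
        rw [hQ' (max ((iN:Int) - 1) 0) (min ((jN:Int) + 2) (m:Int)) (by omega) (by omega) (by omega) (by omega)]
        rw [hQ' (min ((iN:Int) + 2) (matrix.length:Int)) (max ((jN:Int) - 1) 0) (by omega) (by omega) (by omega) (by omega)]
        rw [hQ' (max ((iN:Int) - 1) 0) (max ((jN:Int) - 1) 0) (by omega) (by omega) (by omega) (by omega)]
        rw [show (min ((iN:Int) + 2) (matrix.length:Int)).toNat = iN - 1 + 2 from by omega]
        rw [show (max ((iN:Int) - 1) 0).toNat = iN - 1 from by omega]
        rw [show (min ((jN:Int) + 2) (m:Int)).toNat = 0 + 2 from by omega]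
        rw [show (max ((jN:Int) - 1) 0).toNat = 0 from by omega]
        rw [show (((iN:Int) - 1) : Int).toNat = iN - 1 from by omega]
        rw [show (((iN:Int)) : Int).toNat = iN - 1 + 1 from by omega]
        rw [show (((jN:Int)) : Int).toNat = 0 from by omega]
        rw [show (((jN:Int) + 1) : Int).toNat = 0 + 1 from by omega]
        simp only [pvPV_add2]
        rw [pvRC_add2 matrix (iN - 1) (0) (by rw [hrowlen (iN - 1) (by omega)]; omega)]
        rw [pvRC_add2 matrix (iN - 1 + 1) (0) (by rw [hrowlen (iN - 1 + 1) (by omega)]; omega)]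
        ring
      · by_cases hjr : jN = m - 1
        · -- bottom-right corner
          have hb0 : (((iN:Int)) == 0) = false := by simp [beq_iff_eq]; omega
          have hb1 : (((iN:Int)) == (matrix.length:Int) - 1) = true := by simp [beq_iff_eq]; omega
          have hc0 : (((jN:Int)) == 0) = false := by simp [beq_iff_eq]; omega
          have hc1 : (((jN:Int)) == (m:Int) - 1) = true := by simp [beq_iff_eq]; omega
          simp only [friendsindex, hb0, hb1, hc0, hc1, eq_self_iff_true, if_true, Bool.false_eq_true, if_false]
          simp only [List.map_cons, List.map_nil, List.sum_cons, List.sum_nil]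
          rw [hatom' ((iN:Int) - 1) ((jN:Int)) [] (by omega) (by omega) (by omega) (by omega)]
          rw [hatom' ((iN:Int)) ((jN:Int) - 1) [] (by omega) (by omega) (by omega) (by omega)]
          rw [hatom' ((iN:Int) - 1) ((jN:Int) - 1) [] (by omega) (by omega) (by omega) (by omega)]
          rw [hQ' (min ((iN:Int) + 2) (matrix.length:Int)) (min ((jN:Int) + 2) (m:Int)) (by omega) (by omega) (by omega) (by omega)]
          rw [hQ' (max ((iN:Int) - 1) 0) (min ((jN:Int) + 2) (m:Int)) (by omega) (by omega) (by omega) (by omega)]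
          rw [hQ' (min ((iN:Int) + 2) (matrix.length:Int)) (max ((jN:Int) - 1) 0) (by omega) (by omega) (by omega) (by omega)]
          rw [hQ' (max ((iN:Int) - 1) 0) (max ((jN:Int) - 1) 0) (by omega) (by omega) (by omega) (by omega)]
          rw [show (min ((iN:Int) + 2) (matrix.length:Int)).toNat = iN - 1 + 2 from by omega]
          rw [show (max ((iN:Int) - 1) 0).toNat = iN - 1 from by omega]
          rw [show (min ((jN:Int) + 2) (m:Int)).toNat = jN - 1 + 2 from by omega]
          rw [show (max ((jN:Int) - 1) 0).toNat = jN - 1 from by omega]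
          rw [show (((iN:Int) - 1) : Int).toNat = iN - 1 from by omega]
          rw [show (((iN:Int)) : Int).toNat = iN - 1 + 1 from by omega]
          rw [show (((jN:Int) - 1) : Int).toNat = jN - 1 from by omega]
          rw [show (((jN:Int)) : Int).toNat = jN - 1 + 1 from by omega]
          simp only [pvPV_add2]
          rw [pvRC_add2 matrix (iN - 1) (jN - 1) (by rw [hrowlen (iN - 1) (by omega)]; omega)]
          rw [pvRC_add2 matrix (iN - 1 + 1) (jN - 1) (by rw [hrowlen (iN - 1 + 1) (by omega)]; omega)]
          ring
        · -- bottom edge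
          have hb0 : (((iN:Int)) == 0) = false := by simp [beq_iff_eq]; omega
          have hb1 : (((iN:Int)) == (matrix.length:Int) - 1) = true := by simp [beq_iff_eq]; omega
          have hc0 : (((jN:Int)) == 0) = false := by simp [beq_iff_eq]; omega
          have hc1 : (((jN:Int)) == (m:Int) - 1) = false := by simp [beq_iff_eq]; omega
          simp only [friendsindex, hb0, hb1, hc0, hc1, eq_self_iff_true, if_true, Bool.false_eq_true, if_false]
          simp only [List.map_cons, List.map_nil, List.sum_cons, List.sum_nil]
          rw [hatom' ((iN:Int) - 1) ((jN:Int) - 1) [] (by omega) (by omega) (by omega) (by omega)]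
          rw [hatom' ((iN:Int) - 1) ((jN:Int)) [] (by omega) (by omega) (by omega) (by omega)]
          rw [hatom' ((iN:Int) - 1) ((jN:Int) + 1) [] (by omega) (by omega) (by omega) (by omega)]
          rw [hatom' ((iN:Int)) ((jN:Int) - 1) [] (by omega) (by omega) (by omega) (by omega)]
          rw [hatom' ((iN:Int)) ((jN:Int) + 1) [] (by omega) (by omega) (by omega) (by omega)]
          rw [hQ' (min ((iN:Int) + 2) (matrix.length:Int)) (min ((jN:Int) + 2) (m:Int)) (by omega) (by omega) (by omega) (by omega)]
          rw [hQ' (max ((iN:Int) - 1) 0) (min ((jN:Int) + 2) (m:Int)) (by omega) (by omega) (by omega) (by omega)]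
          rw [hQ' (min ((iN:Int) + 2) (matrix.length:Int)) (max ((jN:Int) - 1) 0) (by omega) (by omega) (by omega) (by omega)]
          rw [hQ' (max ((iN:Int) - 1) 0) (max ((jN:Int) - 1) 0) (by omega) (by omega) (by omega) (by omega)]
          rw [show (min ((iN:Int) + 2) (matrix.length:Int)).toNat = iN - 1 + 2 from by omega]
          rw [show (max ((iN:Int) - 1) 0).toNat = iN - 1 from by omega]
          rw [show (min ((jN:Int) + 2) (m:Int)).toNat = jN - 1 + 3 from by omega]
          rw [show (max ((jN:Int) - 1) 0).toNat = jN - 1 from by omega]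
          rw [show (((iN:Int) - 1) : Int).toNat = iN - 1 from by omega]
          rw [show (((iN:Int)) : Int).toNat = iN - 1 + 1 from by omega]
          rw [show (((jN:Int) - 1) : Int).toNat = jN - 1 from by omega]
          rw [show (((jN:Int)) : Int).toNat = jN - 1 + 1 from by omega]
          rw [show (((jN:Int) + 1) : Int).toNat = jN - 1 + 2 from by omega]
          simp only [pvPV_add2]
          rw [pvRC_add3 matrix (iN - 1) (jN - 1) (by rw [hrowlen (iN - 1) (by omega)]; omega)]
          rw [pvRC_add3 matrix (iN - 1 + 1) (jN - 1) (by rw [hrowlen (iN - 1 + 1) (by omega)]; omega)]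
          ring
    · by_cases hjl : jN = 0
      · -- middle rows, left column
        have hb0 : (((iN:Int)) == 0) = false := by simp [beq_iff_eq]; omega
        have hb1 : (((iN:Int)) == (matrix.length:Int) - 1) = false := by simp [beq_iff_eq]; omega
        simp only [friendsindex, hb0, hb1, eq_self_iff_true, if_true, Bool.false_eq_true, if_false]
        rw [pvPurge_left (matrix.length:Int) (m:Int) (iN:Int) (jN:Int) (by omega) (by omega) (by omega) (by omega)]
        simp only [List.map_cons, List.map_nil, List.sum_cons, List.sum_nil]
        rw [hatom' ((iN:Int) - 1) ((jN:Int)) [] (by omega) (by omega) (by omega) (by omega)]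
        rw [hatom' ((iN:Int) - 1) ((jN:Int) + 1) [] (by omega) (by omega) (by omega) (by omega)]
        rw [hatom' ((iN:Int)) ((jN:Int) + 1) [] (by omega) (by omega) (by omega) (by omega)]
        rw [hatom' ((iN:Int) + 1) ((jN:Int)) [] (by omega) (by omega) (by omega) (by omega)]
        rw [hatom' ((iN:Int) + 1) ((jN:Int) + 1) [] (by omega) (by omega) (by omega) (by omega)]
        rw [hQ' (min ((iN:Int) + 2) (matrix.length:Int)) (min ((jN:Int) + 2) (m:Int)) (by omega) (by omega) (by omega) (by omega)]
        rw [hQ' (max ((iN:Int) - 1) 0) (min ((jN:Int) + 2) (m:Int)) (by omega) (by omega) (by omega) (by omega)]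
        rw [hQ' (min ((iN:Int) + 2) (matrix.length:Int)) (max ((jN:Int) - 1) 0) (by omega) (by omega) (by omega) (by omega)]
        rw [hQ' (max ((iN:Int) - 1) 0) (max ((jN:Int) - 1) 0) (by omega) (by omega) (by omega) (by omega)]
        rw [show (min ((iN:Int) + 2) (matrix.length:Int)).toNat = iN - 1 + 3 from by omega]
        rw [show (max ((iN:Int) - 1) 0).toNat = iN - 1 from by omega]
        rw [show (min ((jN:Int) + 2) (m:Int)).toNat = 0 + 2 from by omega]
        rw [show (max ((jN:Int) - 1) 0).toNat = 0 from by omega]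
        rw [show (((iN:Int) - 1) : Int).toNat = iN - 1 from by omega]
        rw [show (((iN:Int)) : Int).toNat = iN - 1 + 1 from by omega]
        rw [show (((iN:Int) + 1) : Int).toNat = iN - 1 + 2 from by omega]
        rw [show (((jN:Int)) : Int).toNat = 0 from by omega]
        rw [show (((jN:Int) + 1) : Int).toNat = 0 + 1 from by omega]
        simp only [pvPV_add3]
        rw [pvRC_add2 matrix (iN - 1) (0) (by rw [hrowlen (iN - 1) (by omega)]; omega)]
        rw [pvRC_add2 matrix (iN - 1 + 1) (0) (by rw [hrowlen (iN - 1 + 1) (by omega)]; omega)]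
        rw [pvRC_add2 matrix (iN - 1 + 2) (0) (by rw [hrowlen (iN - 1 + 2) (by omega)]; omega)]
        ring
      · by_cases hjr : jN = m - 1
        · -- middle rows, right column
          have hb0 : (((iN:Int)) == 0) = false := by simp [beq_iff_eq]; omega
          have hb1 : (((iN:Int)) == (matrix.length:Int) - 1) = false := by simp [beq_iff_eq]; omega
          simp only [friendsindex, hb0, hb1, eq_self_iff_true, if_true, Bool.false_eq_true, if_false]
          rw [pvPurge_right (matrix.length:Int) (m:Int) (iN:Int) (jN:Int) (by omega) (by omega) (by omega) (by omega)]
          simp only [List.map_cons, List.map_nil, List.sum_cons, List.sum_nil]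
          rw [hatom' ((iN:Int) - 1) ((jN:Int) - 1) [] (by omega) (by omega) (by omega) (by omega)]
          rw [hatom' ((iN:Int) - 1) ((jN:Int)) [] (by omega) (by omega) (by omega) (by omega)]
          rw [hatom' ((iN:Int)) ((jN:Int) - 1) [] (by omega) (by omega) (by omega) (by omega)]
          rw [hatom' ((iN:Int) + 1) ((jN:Int) - 1) [] (by omega) (by omega) (by omega) (by omega)]
          rw [hatom' ((iN:Int) + 1) ((jN:Int)) [] (by omega) (by omega) (by omega) (by omega)]
          rw [hQ' (min ((iN:Int) + 2) (matrix.length:Int)) (min ((jN:Int) + 2) (m:Int)) (by omega) (by omega) (by omega) (by omega)]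
          rw [hQ' (max ((iN:Int) - 1) 0) (min ((jN:Int) + 2) (m:Int)) (by omega) (by omega) (by omega) (by omega)]
          rw [hQ' (min ((iN:Int) + 2) (matrix.length:Int)) (max ((jN:Int) - 1) 0) (by omega) (by omega) (by omega) (by omega)]
          rw [hQ' (max ((iN:Int) - 1) 0) (max ((jN:Int) - 1) 0) (by omega) (by omega) (by omega) (by omega)]
          rw [show (min ((iN:Int) + 2) (matrix.length:Int)).toNat = iN - 1 + 3 from by omega]
          rw [show (max ((iN:Int) - 1) 0).toNat = iN - 1 from by omega]
          rw [show (min ((jN:Int) + 2) (m:Int)).toNat = jN - 1 + 2 from by omega]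
          rw [show (max ((jN:Int) - 1) 0).toNat = jN - 1 from by omega]
          rw [show (((iN:Int) - 1) : Int).toNat = iN - 1 from by omega]
          rw [show (((iN:Int)) : Int).toNat = iN - 1 + 1 from by omega]
          rw [show (((iN:Int) + 1) : Int).toNat = iN - 1 + 2 from by omega]
          rw [show (((jN:Int) - 1) : Int).toNat = jN - 1 from by omega]
          rw [show (((jN:Int)) : Int).toNat = jN - 1 + 1 from by omega]
          simp only [pvPV_add3]
          rw [pvRC_add2 matrix (iN - 1) (jN - 1) (by rw [hrowlen (iN - 1) (by omega)]; omega)]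
          rw [pvRC_add2 matrix (iN - 1 + 1) (jN - 1) (by rw [hrowlen (iN - 1 + 1) (by omega)]; omega)]
          rw [pvRC_add2 matrix (iN - 1 + 2) (jN - 1) (by rw [hrowlen (iN - 1 + 2) (by omega)]; omega)]
          ring
        · -- interior cell
          have hb0 : (((iN:Int)) == 0) = false := by simp [beq_iff_eq]; omega
          have hb1 : (((iN:Int)) == (matrix.length:Int) - 1) = false := by simp [beq_iff_eq]; omega
          simp only [friendsindex, hb0, hb1, eq_self_iff_true, if_true, Bool.false_eq_true, if_false]
          rw [pvPurge_mid (matrix.length:Int) (m:Int) (iN:Int) (jN:Int) (by omega) (by omega) (by omega) (by omega)]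
          simp only [List.map_cons, List.map_nil, List.sum_cons, List.sum_nil]
          rw [hatom' ((iN:Int) - 1) ((jN:Int) - 1) [] (by omega) (by omega) (by omega) (by omega)]
          rw [hatom' ((iN:Int) - 1) ((jN:Int)) [] (by omega) (by omega) (by omega) (by omega)]
          rw [hatom' ((iN:Int) - 1) ((jN:Int) + 1) [] (by omega) (by omega) (by omega) (by omega)]
          rw [hatom' ((iN:Int)) ((jN:Int) - 1) [] (by omega) (by omega) (by omega) (by omega)]
          rw [hatom' ((iN:Int)) ((jN:Int) + 1) [] (by omega) (by omega) (by omega) (by omega)]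
          rw [hatom' ((iN:Int) + 1) ((jN:Int) - 1) [] (by omega) (by omega) (by omega) (by omega)]
          rw [hatom' ((iN:Int) + 1) ((jN:Int)) [] (by omega) (by omega) (by omega) (by omega)]
          rw [hatom' ((iN:Int) + 1) ((jN:Int) + 1) [] (by omega) (by omega) (by omega) (by omega)]
          rw [hQ' (min ((iN:Int) + 2) (matrix.length:Int)) (min ((jN:Int) + 2) (m:Int)) (by omega) (by omega) (by omega) (by omega)]
          rw [hQ' (max ((iN:Int) - 1) 0) (min ((jN:Int) + 2) (m:Int)) (by omega) (by omega) (by omega) (by omega)]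
          rw [hQ' (min ((iN:Int) + 2) (matrix.length:Int)) (max ((jN:Int) - 1) 0) (by omega) (by omega) (by omega) (by omega)]
          rw [hQ' (max ((iN:Int) - 1) 0) (max ((jN:Int) - 1) 0) (by omega) (by omega) (by omega) (by omega)]
          rw [show (min ((iN:Int) + 2) (matrix.length:Int)).toNat = iN - 1 + 3 from by omega]
          rw [show (max ((iN:Int) - 1) 0).toNat = iN - 1 from by omega]
          rw [show (min ((jN:Int) + 2) (m:Int)).toNat = jN - 1 + 3 from by omega]
          rw [show (max ((jN:Int) - 1) 0).toNat = jN - 1 from by omega]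
          rw [show (((iN:Int) - 1) : Int).toNat = iN - 1 from by omega]
          rw [show (((iN:Int)) : Int).toNat = iN - 1 + 1 from by omega]
          rw [show (((iN:Int) + 1) : Int).toNat = iN - 1 + 2 from by omega]
          rw [show (((jN:Int) - 1) : Int).toNat = jN - 1 from by omega]
          rw [show (((jN:Int)) : Int).toNat = jN - 1 + 1 from by omega]
          rw [show (((jN:Int) + 1) : Int).toNat = jN - 1 + 2 from by omega]
          simp only [pvPV_add3]
          rw [pvRC_add3 matrix (iN - 1) (jN - 1) (by rw [hrowlen (iN - 1) (by omega)]; omega)]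
          rw [pvRC_add3 matrix (iN - 1 + 1) (jN - 1) (by rw [hrowlen (iN - 1 + 1) (by omega)]; omega)]
          rw [pvRC_add3 matrix (iN - 1 + 2) (jN - 1) (by rw [hrowlen (iN - 1 + 2) (by omega)]; omega)]
          ring




theorem pvFlatMap_congr {α β : Type} (l : List α) (f g : α → List β)
    (h : ∀ a ∈ l, f a = g a) : l.flatMap f = l.flatMap g := by
  induction l with
  | nil => rfl
  | cons x xs ih =>
    simp only [List.flatMap_cons]
    rw [h x (by simp), ih (fun a ha => h a (by simp [ha]))]

-- ===== VERDICT (by name: the statement is the Claim_ definition above) =====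
theorem comfy_spec : Claim_equal_comfy := by
  intro matrix tolerance good _hdom hpre
  obtain ⟨hn2, hrect, hm1⟩ := hpre
  have h1lt : 1 < matrix.length := by omega
  have hrow1 : (PySem.List.pyGet? matrix 1).getD [] = matrix.getD 1 [] := by
    rw [show (1:Int) = ((1:Nat):Int) from rfl, PySem.List.pyGet?_ofNat matrix 1 h1lt,
      Option.getD_some, List.getD_eq_getElem _ _ h1lt]
  have hrowlen : ∀ x : Nat, x < matrix.length → (matrix.getD x []).length = ((matrix.getD 1 []).length) := by
    intro x hx
    rw [List.getD_eq_getElem _ _ hx]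
    exact hrect _ (List.getElem_mem hx)
  unfold Spec_comfy
  show comfy matrix tolerance good = comfy_alt matrix tolerance good
  unfold comfy comfy_alt
  dsimp only []
  rw [hrow1]
  dsimp only [Int.toNat_natCast]
  trans (List.flatMap (fun p : Int × List String => List.map (fun q : Int × String => ([p.1, q.1] : List Int)) (List.filter (fun q : Int × String => decide (countfriends matrix p.1 q.1 (matrix.length:Int) (((matrix.getD 1 []).length):Int) "@" < tolerance ∧ (PySem.List.pyGet? matrix p.1).bind (fun r => PySem.List.pyGet? r q.1) = some good)) (PySem.List.enumerate p.2 0))) (PySem.List.enumerate matrix 0))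
  · refine (PySem.List.foldl_congr_mem (PySem.List.enumerate matrix 0) _
      (fun (acc : List (List Int)) (p : Int × List String) => acc ++ (fun p : Int × List String => List.map (fun q : Int × String => ([p.1, q.1] : List Int)) (List.filter (fun q : Int × String => decide (countfriends matrix p.1 q.1 (matrix.length:Int) (((matrix.getD 1 []).length):Int) "@" < tolerance ∧ (PySem.List.pyGet? matrix p.1).bind (fun r => PySem.List.pyGet? r q.1) = some good)) (PySem.List.enumerate p.2 0))) p) []
      (fun acc p _ => PySem.List.foldl_append_ite _ _ _ _)).trans ?_
    rw [PySem.List.foldl_append_eq_flatMap, List.nil_append]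
  trans (List.flatMap (fun i : Int => List.map (fun j : Int => ([i, j] : List Int)) (List.filter (fun j : Int => decide ((if (PySem.List.pyGet? matrix (i)).bind (fun r => PySem.List.pyGet? r (j)) = some "@" then ((PySem.List.pyGet? ((PySem.List.pyGet? (pvPrefix "@" matrix ((matrix.getD 1 []).length)) (min (i + 2) (matrix.length:Int))).getD []) (min (j + 2) (((matrix.getD 1 []).length):Int))).getD 0 - (PySem.List.pyGet? ((PySem.List.pyGet? (pvPrefix "@" matrix ((matrix.getD 1 []).length)) (max (i - 1) 0)).getD []) (min (j + 2) (((matrix.getD 1 []).length):Int))).getD 0 - (PySem.List.pyGet? ((PySem.List.pyGet? (pvPrefix "@" matrix ((matrix.getD 1 []).length)) (min (i + 2) (matrix.length:Int))).getD []) (max (j - 1) 0)).getD 0 + (PySem.List.pyGet? ((PySem.List.pyGet? (pvPrefix "@" matrix ((matrix.getD 1 []).length)) (max (i - 1) 0)).getD []) (max (j - 1) 0)).getD 0) - 1 else ((PySem.List.pyGet? ((PySem.List.pyGet? (pvPrefix "@" matrix ((matrix.getD 1 []).length)) (min (i + 2) (matrix.length:Int))).getD []) (min (j + 2) (((matrix.getD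 1 []).length):Int))).getD 0 - (PySem.List.pyGet? ((PySem.List.pyGet? (pvPrefix "@" matrix ((matrix.getD 1 []).length)) (max (i - 1) 0)).getD []) (min (j + 2) (((matrix.getD 1 []).length):Int))).getD 0 - (PySem.List.pyGet? ((PySem.List.pyGet? (pvPrefix "@" matrix ((matrix.getD 1 []).length)) (min (i + 2) (matrix.length:Int))).getD []) (max (j - 1) 0)).getD 0 + (PySem.List.pyGet? ((PySem.List.pyGet? (pvPrefix "@" matrix ((matrix.getD 1 []).length)) (max (i - 1) 0)).getD []) (max (j - 1) 0)).getD 0)) < tolerance ∧ (PySem.List.pyGet? matrix (i)).bind (fun r => PySem.List.pyGet? r j) = some good)) (PySem.List.pyRange 0 (((matrix.getD 1 []).length):Int) 1))) (PySem.List.pyRange 0 (matrix.length:Int) 1))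
  swap
  · symm
    refine (PySem.List.foldl_congr_mem (PySem.List.pyRange 0 (matrix.length:Int) 1) _
      (fun (acc : List (List Int)) (i : Int) => acc ++ (fun i : Int => List.map (fun j : Int => ([i, j] : List Int)) (List.filter (fun j : Int => decide ((if (PySem.List.pyGet? matrix (i)).bind (fun r => PySem.List.pyGet? r (j)) = some "@" then ((PySem.List.pyGet? ((PySem.List.pyGet? (pvPrefix "@" matrix ((matrix.getD 1 []).length)) (min (i + 2) (matrix.length:Int))).getD []) (min (j + 2) (((matrix.getD 1 []).length):Int))).getD 0 - (PySem.List.pyGet? ((PySem.List.pyGet? (pvPrefix "@" matrix ((matrix.getD 1 []).length)) (max (i - 1) 0)).getD []) (min (j + 2) (((matrix.getD 1 []).length):Int))).getD 0 - (PySem.List.pyGet? ((PySem.List.pyGet? (pvPrefix "@" matrix ((matrix.getD 1 []).length)) (min (i + 2) (matrix.length:Int))).getD []) (max (j - 1) 0)).getD 0 + (PySem.List.pyGet? ((PySem.List.pyGet? (pvPrefix "@" matrix ((matrix.getD 1 []).length)) (max (i - 1) 0)).getD []) (max (j - 1) 0)).getD 0) - 1 else ((PySem.List.pyGet? ((PySem.List.pyGet?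 (pvPrefix "@" matrix ((matrix.getD 1 []).length)) (min (i + 2) (matrix.length:Int))).getD []) (min (j + 2) (((matrix.getD 1 []).length):Int))).getD 0 - (PySem.List.pyGet? ((PySem.List.pyGet? (pvPrefix "@" matrix ((matrix.getD 1 []).length)) (max (i - 1) 0)).getD []) (min (j + 2) (((matrix.getD 1 []).length):Int))).getD 0 - (PySem.List.pyGet? ((PySem.List.pyGet? (pvPrefix "@" matrix ((matrix.getD 1 []).length)) (min (i + 2) (matrix.length:Int))).getD []) (max (j - 1) 0)).getD 0 + (PySem.List.pyGet? ((PySem.List.pyGet? (pvPrefix "@" matrix ((matrix.getD 1 []).length)) (max (i - 1) 0)).getD []) (max (j - 1) 0)).getD 0)) < tolerance ∧ (PySem.List.pyGet? matrix (i)).bind (fun r => PySem.List.pyGet? r j) = some good)) (PySem.List.pyRange 0 (((matrix.getD 1 []).length):Int) 1))) i) []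
      (fun acc i _ => PySem.List.foldl_append_ite _ _ _ _)).trans ?_
    rw [PySem.List.foldl_append_eq_flatMap, List.nil_append]
  rw [PySem.List.enumerate_eq_map_pyRange matrix [], List.flatMap_map,
    show PySem.List.len matrix = (matrix.length:Int) from rfl]
  refine pvFlatMap_congr _ _ _ ?_
  intro iv hiv
  rw [PySem.List.mem_pyRange_one] at hiv
  obtain ⟨iN, rfl⟩ : ∃ k : Nat, iv = (k : Int) := ⟨iv.toNat, (Int.toNat_of_nonneg hiv.1).symm⟩
  have hiN : iN < matrix.length := by exact_mod_cast hiv.2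
  dsimp only []
  rw [PySem.List.pyGetD_natCast]
  rw [PySem.List.enumerate_eq_map_pyRange (matrix.getD iN []) "",
    show PySem.List.len (matrix.getD iN []) = (((matrix.getD 1 []).length) : Int) from by
      rw [show PySem.List.len (matrix.getD iN []) = (((matrix.getD iN []).length : Nat) : Int) from rfl,
        hrowlen iN hiN]]
  rw [List.filter_map, List.map_map]
  have hcond : ∀ jv ∈ PySem.List.pyRange 0 (((matrix.getD 1 []).length) : Int) 1,
      ((fun q : Int × String => decide (countfriends matrix (iN:Int) q.1 (matrix.length:Int) (((matrix.getD 1 []).length):Int) "@" < tolerance ∧ (PySem.List.pyGet? matrix (iN:Int)).bind (fun r => PySem.List.pyGet? r q.1) = some good)) ∘ (fun j : Int => (j, PySem.List.pyGetD (matrix.getD iN []) j ""))) jv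
        = (fun j : Int => decide ((if (PySem.List.pyGet? matrix ((iN:Int))).bind (fun r => PySem.List.pyGet? r (j)) = some "@" then ((PySem.List.pyGet? ((PySem.List.pyGet? (pvPrefix "@" matrix ((matrix.getD 1 []).length)) (min ((iN:Int) + 2) (matrix.length:Int))).getD []) (min (j + 2) (((matrix.getD 1 []).length):Int))).getD 0 - (PySem.List.pyGet? ((PySem.List.pyGet? (pvPrefix "@" matrix ((matrix.getD 1 []).length)) (max ((iN:Int) - 1) 0)).getD []) (min (j + 2) (((matrix.getD 1 []).length):Int))).getD 0 - (PySem.List.pyGet? ((PySem.List.pyGet? (pvPrefix "@" matrix ((matrix.getD 1 []).length)) (min ((iN:Int) + 2) (matrix.length:Int))).getD []) (max (j - 1) 0)).getD 0 + (PySem.List.pyGet? ((PySem.List.pyGet? (pvPrefix "@" matrix ((matrix.getD 1 []).length)) (max ((iN:Int) - 1) 0)).getD []) (max (j - 1) 0)).getD 0) - 1 else ((PySem.List.pyGet? ((PySem.List.pyGet? (pvPrefix "@" matrix ((matrix.getD 1 []).length)) (min ((iN:Int) + 2) (matrix.length:Int))).getD []) (min (j + 2) (((matrix.getD 1 []).length):Int))).getD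 0 - (PySem.List.pyGet? ((PySem.List.pyGet? (pvPrefix "@" matrix ((matrix.getD 1 []).length)) (max ((iN:Int) - 1) 0)).getD []) (min (j + 2) (((matrix.getD 1 []).length):Int))).getD 0 - (PySem.List.pyGet? ((PySem.List.pyGet? (pvPrefix "@" matrix ((matrix.getD 1 []).length)) (min ((iN:Int) + 2) (matrix.length:Int))).getD []) (max (j - 1) 0)).getD 0 + (PySem.List.pyGet? ((PySem.List.pyGet? (pvPrefix "@" matrix ((matrix.getD 1 []).length)) (max ((iN:Int) - 1) 0)).getD []) (max (j - 1) 0)).getD 0)) < tolerance ∧ (PySem.List.pyGet? matrix ((iN:Int))).bind (fun r => PySem.List.pyGet? r j) = some good)) jv := by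
    intro jv hjv
    rw [PySem.List.mem_pyRange_one] at hjv
    obtain ⟨jN, rfl⟩ : ∃ k : Nat, jv = (k : Int) := ⟨jv.toNat, (Int.toNat_of_nonneg hjv.1).symm⟩
    have hjN : jN < ((matrix.getD 1 []).length) := by exact_mod_cast hjv.2
    simp only [Function.comp_apply]
    rw [decide_eq_decide]
    rw [pvPercell matrix ((matrix.getD 1 []).length) hrect hn2 (by omega) (iN:Int) (jN:Int) (by omega)
      (by exact_mod_cast hiN) (by omega) (by exact_mod_cast hjN)]
  rw [List.filter_congr hcond]
  exact List.map_congr_left (fun x _ => rfl)
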